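-- pv_equiv track=rewrite | github.com/ltj1605/apneadetect | trt_apnea_wake/lib/TRT_detection_.py | detection_start_end
-- ===== SOURCE A (Python) =====
-- def detection_start_end(data, posture, order_resp = 2, order_posture = 5):
--     num = 0
--     start_idx = 0
--     end_idx = len(data) -1
--     for idx, val in enumerate(posture):
--         if val != 0:
--             num += 1
--             if num >= order_posture:
--                 start_idx = idx - order_posture + 1
--                 num = 0
--                 break
--             else:
--                 pass
--         else:
--             num = 0
--     num = 0
--     for idx in reversed(range(len(data))):
--         val = data[idx]
--         if val == 1:
--             num += 1
--             if num >= order_resp: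
--                 end_idx = idx + order_resp - 1
--                 num = 0
--                 break
--             else:
--                 pass
--         else:
--             num = 0
--     num = 0
--     return start_idx, end_idx
-- ===== SOURCE B (Python) =====
-- def _runs(xs, pred):
--     # maximal runs of equal pred-value, as (key, start, end) half-open triples
--     runs = []
--     for i, x in enumerate(xs):
--         k = pred(x)
--         if runs and runs[-1][0] == k:
--             kk, s, e = runs[-1]
--             runs[-1] = (kk, s, e + 1)
--         else:
--             runs.append((k, i, i + 1))
--     return runs
--
-- def detection_start_end(data, posture, order_resp=2, order_posture=5):
--     start_idx = 0
--     for k, s, e in _runs(posture, lambda v: v != 0):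
--         if k and e - s >= order_posture:
--             start_idx = s
--             break
--     end_idx = len(data) - 1
--     for k, s, e in _runs(data, lambda v: v == 1):
--         if k and e - s >= order_resp:
--             end_idx = e - 1
--     return start_idx, end_idx
-- ===== Notes on version B (the rewrite author's own statement) =====
-- stated objective: alternative
-- what changed: Replaced A's two counter-with-early-break index scans (forward over posture, backward over data) by a run-length-encoding pass per sequence (maximal runs as (key,start,end) triples) followed by a scan over the runs: first nonzero run of length >= order_posture gives start_idx, last ones-run of length >= order_resp gives end_idx; Pre_ excludes non-positive order thresholds when a matching element exists, where the degenerate 'order' makes A return first-match-index - order + 1 (possibly outside the list) while B returns the run boundary -- both equally defensible, neither specified.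
-- outside the precondition, e.g. on detection_start_end([1], [1], 0, 0): A returns (1, -1), B returns (0, 0); on detection_start_end([0, 1], [0, 1], -1, -1): A returns (3, -1), B returns (1, 1)
import Mathlib
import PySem

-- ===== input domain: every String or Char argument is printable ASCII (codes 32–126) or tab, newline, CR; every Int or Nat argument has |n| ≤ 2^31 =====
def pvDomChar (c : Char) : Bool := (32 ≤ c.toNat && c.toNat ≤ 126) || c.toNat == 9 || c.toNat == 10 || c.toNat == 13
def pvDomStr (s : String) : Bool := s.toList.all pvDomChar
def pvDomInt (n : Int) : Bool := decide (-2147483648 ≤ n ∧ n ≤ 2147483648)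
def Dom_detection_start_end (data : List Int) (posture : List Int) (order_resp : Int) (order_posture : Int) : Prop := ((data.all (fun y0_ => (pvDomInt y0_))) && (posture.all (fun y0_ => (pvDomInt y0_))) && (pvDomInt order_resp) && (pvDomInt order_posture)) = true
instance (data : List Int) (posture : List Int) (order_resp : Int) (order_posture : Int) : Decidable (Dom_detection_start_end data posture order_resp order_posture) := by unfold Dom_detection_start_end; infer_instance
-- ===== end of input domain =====

-- B replaces A's two counter-with-early-break scans by a run-length-encoding pass per sequence plus a
-- scan over the runs; objective: alternative (same cost, different algorithm). A = B on Pre_ below.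

-- ===== PORT A =====
-- first loop of A: enumerate(posture) with a consecutive-nonzero counter and early break
def aStartLoop (op : Int) : List Int → Int → Int → Option Int
  | [], _, _ => none
  | v :: rest, idx, num =>
    if v ≠ 0 then
      if num + 1 ≥ op then some (idx - op + 1)
      else aStartLoop op rest (idx + 1) (num + 1)
    else aStartLoop op rest (idx + 1) 0

-- second loop of A: for idx in reversed(range(len(data))) with data[idx], counter, early break
def aEndLoop (orr : Int) (data : List Int) : List Int → Int → Option Int
  | [], _ => none
  | idx :: rest, num =>
    match PySem.List.pyGet? data idx with
    | none => none  -- unreachable: idx ∈ range(len(data))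
    | some v =>
      if v = 1 then
        if num + 1 ≥ orr then some (idx + orr - 1)
        else aEndLoop orr data rest (num + 1)
      else aEndLoop orr data rest 0

def detection_start_end (data : List Int) (posture : List Int) (order_resp : Int) (order_posture : Int) : Int × Int :=
  ((aStartLoop order_posture posture 0 0).getD 0,
   (aEndLoop order_resp data (PySem.List.pyRange 0 data.length 1).reverse 0).getD ((data.length : Int) - 1))

-- ===== PORT B =====
-- one fold step of B's _runs: extend the last run or open a new one (runs kept reversed, head = last)
def bRunsStep (p : Int → Bool) (acc : List (Bool × Int × Int)) (ix : Int × Int) : List (Bool × Int × Int) :=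
  let k := p ix.2
  match acc with
  | (kk, s, e) :: t => if kk = k then (kk, s, e + 1) :: t else (k, ix.1, ix.1 + 1) :: (kk, s, e) :: t
  | [] => [(k, ix.1, ix.1 + 1)]

-- B's _runs: maximal runs (key, start, end) half-open, built in one pass over enumerate(xs)
def bRuns (xs : List Int) (p : Int → Bool) : List (Bool × Int × Int) :=
  ((PySem.List.enumerate xs 0).foldl (bRunsStep p) []).reverse

-- B's first loop: first nonzero run of sufficient length, early break
def bStartLoop (op : Int) : List (Bool × Int × Int) → Int
  | [] => 0
  | (k, s, e) :: rest => if k = true ∧ e - s ≥ op then s else bStartLoop op rest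

-- B's second loop: keep the last qualifying ones-run
def bEndFold (orr : Int) (runs : List (Bool × Int × Int)) (d : Int) : Int :=
  runs.foldl (fun acc r => if r.1 = true ∧ r.2.2 - r.2.1 ≥ orr then r.2.2 - 1 else acc) d

def detection_start_end_alt (data : List Int) (posture : List Int) (order_resp : Int) (order_posture : Int) : Int × Int :=
  (bStartLoop order_posture (bRuns posture (fun v => decide (v ≠ 0))),
   bEndFold order_resp (bRuns data (fun v => decide (v = 1))) ((data.length : Int) - 1))

-- ===== PRECONDITION & SPEC =====
-- Pre_ excludes non-positive order thresholds when a matching element exists: there the degenerate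
-- "order" makes A return first-match-index - order + 1 (which can point past the match or outside the
-- list, e.g. (1, -1) for data=[1], posture=[1], orders 0) while B returns the matching run's boundary
-- index; neither value is specified by the function's purpose, so both are equally defensible.
def Pre_detection_start_end (data : List Int) (posture : List Int) (order_resp : Int) (order_posture : Int) : Prop :=
  (1 ≤ order_posture ∨ ∀ v ∈ posture, v = 0) ∧ (1 ≤ order_resp ∨ (1 : Int) ∉ data)
instance (data : List Int) (posture : List Int) (order_resp : Int) (order_posture : Int) : Decidable (Pre_detection_start_end data posture order_resp order_posture) := by unfold Pre_detection_start_end; infer_instance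

def pvWitness_detection_start_end : List Int × List Int × Int × Int := ([0, 1, 1, 0], [1, 1, 1], 2, 2)

def Spec_detection_start_end (data : List Int) (posture : List Int) (order_resp : Int) (order_posture : Int) (out : Int × Int) : Prop := out = detection_start_end_alt data posture order_resp order_posture
instance (data : List Int) (posture : List Int) (order_resp : Int) (order_posture : Int) (out : Int × Int) : Decidable (Spec_detection_start_end data posture order_resp order_posture out) := by unfold Spec_detection_start_end; infer_instance

-- ===== CLAIM (what is proved, stated in full; the proofs are below) =====
def Claim_equal_detection_start_end : Prop := ∀ (data : List Int) (posture : List Int) (order_resp : Int) (order_posture : Int), Dom_detection_start_end data posture order_resp order_posture → Pre_detection_start_end data posture order_resp order_posture → Spec_detection_start_end data posture order_resp order_posture (detection_start_end data posture order_resp order_posture)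

-- ===== LEMMAS AND PROOFS =====

-- runs of xs starting at absolute index i, peeled one maximal run at a time (proof-side view of bRuns)
def runsFrom (p : Int → Bool) (i : Nat) : List Int → List (Bool × Int × Int)
  | [] => []
  | x :: xs =>
    (p x, (i : Int), (i : Int) + 1 + (xs.takeWhile (fun y => p y = p x)).length)
      :: runsFrom p (i + 1 + (xs.takeWhile (fun y => p y = p x)).length) (xs.dropWhile (fun y => p y = p x))
  termination_by xs => xs.length
  decreasing_by simpa using Nat.lt_succ_of_le (List.length_dropWhile_le _ _)

-- runs with a pending open run (key k, started at s, next absolute index i)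
def pendRuns (p : Int → Bool) (k : Bool) (s : Int) (i : Nat) (xs : List Int) : List (Bool × Int × Int) :=
  (k, s, (i : Int) + (xs.takeWhile (fun y => p y = k)).length)
    :: runsFrom p (i + (xs.takeWhile (fun y => p y = k)).length) (xs.dropWhile (fun y => p y = k))

theorem runsFrom_nil (p : Int → Bool) (i : Nat) : runsFrom p i [] = [] := by
  rw [runsFrom.eq_def]

theorem runsFrom_cons (p : Int → Bool) (i : Nat) (x : Int) (xs : List Int) :
    runsFrom p i (x :: xs)
      = (p x, (i : Int), (i : Int) + 1 + (xs.takeWhile (fun y => p y = p x)).length)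
          :: runsFrom p (i + 1 + (xs.takeWhile (fun y => p y = p x)).length)
              (xs.dropWhile (fun y => p y = p x)) := by
  rw [runsFrom.eq_def]

theorem foldl_bRunsStep (p : Int → Bool) :
    ∀ (xs : List Int) (i : Nat) (k : Bool) (s : Int) (t : List (Bool × Int × Int)),
    ((PySem.List.enumerate xs (i : Int)).foldl (bRunsStep p) ((k, s, (i : Int)) :: t)).reverse
      = t.reverse ++ pendRuns p k s i xs := by
  intro xs
  induction xs with
  | nil =>
    intro i k s t
    simp [PySem.List.enumerate, pendRuns, runsFrom]
  | cons x xs ih =>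
    intro i k s t
    rw [PySem.List.enumerate_cons]
    simp only [List.foldl_cons]
    by_cases h : k = p x
    · subst h
      have step : bRunsStep p ((p x, s, (i : Int)) :: t) ((i : Int), x)
          = (p x, s, (i : Int) + 1) :: t := by simp [bRunsStep]
      rw [step]
      have hc : ((i : Int) + 1) = (((i + 1 : Nat)) : Int) := by push_cast; ring
      rw [hc, ih (i + 1) (p x) s t]
      congr 1
      simp only [pendRuns, List.takeWhile_cons, List.dropWhile_cons, decide_eq_true_eq,
        List.length_cons]
      simp only [if_true, List.length_cons, List.cons.injEq, Prod.mk.injEq, true_and]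
      refine ⟨by push_cast; ring, ?_⟩
      congr 1
      omega
    · have step : bRunsStep p ((k, s, (i : Int)) :: t) ((i : Int), x)
          = (p x, (i : Int), (i : Int) + 1) :: (k, s, (i : Int)) :: t := by
        simp [bRunsStep, h]
      rw [step]
      have hc : ((i : Int) + 1) = (((i + 1 : Nat)) : Int) := by push_cast; ring
      rw [hc, ih (i + 1) (p x) (i : Int) ((k, s, (i : Int)) :: t)]
      rw [List.reverse_cons, List.append_assoc]
      congr 1
      have hpx : (p x = k) = False := by simp [Ne.symm h]
      simp only [pendRuns, List.takeWhile_cons, List.dropWhile_cons, hpx, decide_false,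
        if_false, List.takeWhile_nil, List.length_nil, Nat.cast_zero, add_zero,
        List.singleton_append, Nat.add_zero]
      simp [pendRuns, hpx, runsFrom_cons]

theorem bRuns_eq_runsFrom (xs : List Int) (p : Int → Bool) :
    bRuns xs p = runsFrom p 0 xs := by
  cases xs with
  | nil => simp [bRuns, PySem.List.enumerate, runsFrom_nil]
  | cons x xs =>
    unfold bRuns
    rw [show ((0:Int) = ((0:Nat) : Int)) from rfl, PySem.List.enumerate_cons]
    simp only [List.foldl_cons]
    have step : bRunsStep p [] (((0:Nat) : Int), x) = [(p x, ((0:Nat) : Int), ((0:Nat) : Int) + 1)] := by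
      simp [bRunsStep]
    rw [step]
    have hc : (((0:Nat) : Int) + 1) = (((1 : Nat)) : Int) := by norm_num
    rw [hc]
    have := foldl_bRunsStep p xs 1 (p x) ((0:Nat) : Int) []
    rw [this]
    simp only [List.reverse_nil, List.nil_append, pendRuns, runsFrom_cons]
    simp only [List.cons.injEq, Prod.mk.injEq, true_and]
    exact ⟨by norm_num, trivial⟩

-- ---- start side (order_posture ≥ 1) ----

-- skipping a leading false-keyed element does not change bStartLoop's answer
theorem bStartLoop_skip_false (op : Int) (p : Int → Bool) (x : Int) (hp : p x = false) :
    ∀ (xs : List Int) (i : Nat),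
    bStartLoop op (runsFrom p i (x :: xs)) = bStartLoop op (runsFrom p (i + 1) xs) := by
  intro xs i
  rw [runsFrom_cons]
  rw [bStartLoop]
  rw [if_neg (by simp [hp])]
  cases xs with
  | nil => simp
  | cons y ys =>
    by_cases hy : p y = false
    · rw [runsFrom_cons]
      rw [bStartLoop]
      rw [if_neg (by simp [hy])]
      simp only [hp, hy, List.takeWhile_cons, decide_true, if_true, List.dropWhile_cons,
        List.length_cons]
      have harith : i + 1 + ((List.takeWhile (fun y => decide (p y = false)) ys).length + 1)
          = i + 1 + 1 + (List.takeWhile (fun y => decide (p y = false)) ys).length := by omega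
      rw [harith]
    · have hy' : p y = true := by revert hy; cases p y <;> simp
      have hL : (List.takeWhile (fun z => p z = p x) (y :: ys)) = [] := by
        simp [List.takeWhile_cons, hp, hy']
      have hD : (List.dropWhile (fun z => p z = p x) (y :: ys)) = y :: ys := by
        simp [List.dropWhile_cons, hp, hy']
      rw [hL, hD]
      simp

theorem start_main (op : Int) (hop : 1 ≤ op) :
    ∀ (xs : List Int) (i : Nat) (num : Int),
    (num = 0 ∨ (1 ≤ num ∧ num < op)) →
    (aStartLoop op xs (i : Int) num).getD 0
      = (if num = 0 then bStartLoop op (runsFrom (fun v => decide (v ≠ 0)) i xs)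
         else bStartLoop op (pendRuns (fun v => decide (v ≠ 0)) true ((i : Int) - num) i xs)) := by
  intro xs
  induction xs with
  | nil =>
    intro i num h
    rcases h with h0 | ⟨h1, h2⟩
    · subst h0
      simp [aStartLoop, runsFrom_nil, bStartLoop]
    · rw [if_neg (by omega)]
      simp only [aStartLoop, pendRuns, List.takeWhile_nil, List.length_nil, Nat.cast_zero,
        add_zero, List.dropWhile_nil, runsFrom_nil, Nat.add_zero]
      rw [bStartLoop]
      rw [if_neg (by push_cast; omega)]
      simp [bStartLoop]
  | cons x xs ih =>
    intro i num h
    have hnn : 0 ≤ num := by rcases h with h0 | ⟨h1, h2⟩ <;> omega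
    by_cases hx : x ≠ 0
    · have hpx : (decide (x ≠ 0)) = true := by simp [hx]
      by_cases ht : num + 1 ≥ op
      · simp only [aStartLoop]
        rw [if_pos hx, if_pos ht, Option.getD_some]
        rcases h with h0 | ⟨h1, h2⟩
        · subst h0
          rw [if_pos rfl, runsFrom_cons, bStartLoop]
          -- first run is nonzero-keyed with length ≥ op (here op = 1)
          rw [if_pos ⟨hpx, by push_cast; omega⟩]
          omega
        · rw [if_neg (by omega)]
          unfold pendRuns
          simp only [List.takeWhile_cons, List.dropWhile_cons, hpx, decide_true,
            if_true, List.length_cons]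
          rw [bStartLoop]
          rw [if_pos ⟨rfl, by push_cast; omega⟩]
          omega
      · simp only [aStartLoop]
        rw [if_pos hx, if_neg ht]
        have hcast : (i : Int) + 1 = ((i + 1 : Nat) : Int) := by push_cast; ring
        rw [hcast, ih (i + 1) (num + 1) (Or.inr ⟨by omega, by omega⟩), if_neg (by omega)]
        have hs : ((i + 1 : Nat) : Int) - (num + 1) = (i : Int) - num := by push_cast; ring
        rw [hs]
        rcases h with h0 | ⟨h1, h2⟩
        · subst h0
          rw [if_pos rfl, runsFrom_cons]
          refine congrArg (bStartLoop op) ?_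
          unfold pendRuns
          simp only [hpx, sub_zero]
          rw [← hcast]
        · rw [if_neg (by omega)]
          refine congrArg (bStartLoop op) ?_
          unfold pendRuns
          simp only [List.takeWhile_cons, List.dropWhile_cons, hpx, decide_true,
            if_true, List.length_cons]
          simp only [List.cons.injEq, Prod.mk.injEq, true_and]
          refine ⟨by push_cast; ring, ?_⟩
          congr 1
          omega
    · have hpx : (decide (x ≠ 0)) = false := by simpa using hx
      simp only [aStartLoop]
      rw [if_neg hx]
      have hcast : (i : Int) + 1 = ((i + 1 : Nat) : Int) := by push_cast; ring
      rw [hcast, ih (i + 1) 0 (Or.inl rfl), if_pos rfl]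
      rcases h with h0 | ⟨h1, h2⟩
      · subst h0
        rw [if_pos rfl]
        exact (bStartLoop_skip_false op _ x hpx xs i).symm
      · rw [if_neg (by omega)]
        unfold pendRuns
        simp only [List.takeWhile_cons, List.dropWhile_cons, hpx, decide_false,
          Bool.false_eq_true, if_false, List.length_nil, Nat.cast_zero, add_zero, Nat.add_zero,
          List.takeWhile_nil]
        rw [bStartLoop]
        rw [if_neg (by push_cast; omega)]
        exact (bStartLoop_skip_false op _ x hpx xs i).symm

-- ---- start side (order_posture ≤ 0, posture all zero) ----

theorem aStartLoop_all_zero (op : Int) :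
    ∀ (xs : List Int), (∀ v ∈ xs, v = 0) → ∀ (i num : Int), aStartLoop op xs i num = none := by
  intro xs
  induction xs with
  | nil => intro _ i num; rfl
  | cons x xs ih =>
    intro h i num
    have hx : x = 0 := h x (by simp)
    simp only [aStartLoop, hx, ne_eq, not_true_eq_false, if_false]
    exact ih (fun v hv => h v (by simp [hv])) _ _

theorem bStartLoop_all_false (op : Int) (p : Int → Bool) :
    ∀ (n : Nat) (xs : List Int), xs.length ≤ n → (∀ v ∈ xs, p v = false) → ∀ (i : Nat),
    bStartLoop op (runsFrom p i xs) = 0 := by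
  intro n
  induction n with
  | zero =>
    intro xs hn _ i
    have : xs = [] := List.eq_nil_of_length_eq_zero (by omega)
    subst this; simp [runsFrom_nil, bStartLoop]
  | succ n ihn =>
    intro xs hn h i
    cases xs with
    | nil => simp [runsFrom_nil, bStartLoop]
    | cons x rest =>
      have hx : p x = false := h x (by simp)
      rw [bStartLoop_skip_false op p x hx rest i]
      have hsub : rest.length ≤ n := by simpa using hn
      exact ihn rest hsub (fun v hv => h v (by simp [hv])) (i + 1)

-- ---- end side (order_resp ≥ 1) ----

-- A's backward scan as structural recursion over data.reverse, carrying the current index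
def aEndRev (orr : Int) : List Int → Int → Int → Option Int
  | [], _, _ => none
  | v :: ys, i, num =>
    if v = 1 then
      if num + 1 ≥ orr then some (i + orr - 1)
      else aEndRev orr ys (i - 1) (num + 1)
    else aEndRev orr ys (i - 1) 0

-- same scan with the final counter made explicit
def aEndSt (orr : Int) : List Int → Int → Int → Option Int × Int
  | [], _, num => (none, num)
  | v :: ys, i, num =>
    if v = 1 then
      if num + 1 ≥ orr then (some (i + orr - 1), num)
      else aEndSt orr ys (i - 1) (num + 1)
    else aEndSt orr ys (i - 1) 0

theorem aEndLoop_eq_aEndRev (orr : Int) (data : List Int) :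
    ∀ (k : Nat), k ≤ data.length →
    ∀ (num : Int), aEndLoop orr data ((PySem.List.pyRange 0 k 1).reverse) num
      = aEndRev orr ((data.take k).reverse) ((k : Int) - 1) num := by
  intro k
  induction k with
  | zero => intro _ num; simp [aEndLoop, aEndRev]
  | succ k ih =>
    intro hk num
    have hk' : k < data.length := by omega
    have hrange : PySem.List.pyRange 0 ((k : Int) + 1) 1
        = PySem.List.pyRange 0 (k : Int) 1 ++ [(k : Int)] := by
      exact PySem.List.pyRange_one_succ_right (by omega)
    have htake : data.take (k + 1) = data.take k ++ [data[k]] := by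
      rw [List.take_add_one]
      simp [List.getElem?_eq_getElem hk']
    push_cast
    rw [hrange, htake, List.reverse_append, List.reverse_singleton, List.singleton_append,
      List.reverse_append, List.reverse_singleton, List.singleton_append]
    simp only [aEndLoop, aEndRev, PySem.List.pyGet?_natCast, List.getElem?_eq_getElem hk']
    have hidx : (k : Int) + 1 - 1 - 1 = (k : Int) - 1 := by omega
    split_ifs with h1 h2
    · exact congrArg some (by omega)
    · rw [hidx]; exact ih (by omega) (num + 1)
    · rw [hidx]; exact ih (by omega) 0

theorem aEndRev_eq_fst_aEndSt (orr : Int) :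
    ∀ (ys : List Int) (i num : Int), aEndRev orr ys i num = (aEndSt orr ys i num).1 := by
  intro ys
  induction ys with
  | nil => intro i num; rfl
  | cons v ys ih =>
    intro i num
    simp only [aEndRev, aEndSt]
    split_ifs <;> simp [ih]

theorem aEndSt_append (orr : Int) :
    ∀ (ys zs : List Int) (i num : Int),
    aEndSt orr (ys ++ zs) i num
      = match aEndSt orr ys i num with
        | (some r, m) => (some r, m)
        | (none, m) => aEndSt orr zs (i - ys.length) m := by
  intro ys
  induction ys with
  | nil => intro zs i num; simp [aEndSt]
  | cons v ys ih =>
    intro zs i num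
    simp only [List.cons_append, aEndSt]
    split_ifs with h1 h2
    · rfl
    · rw [ih]
      have : i - 1 - (ys.length : Int) = i - ((v :: ys).length : Int) := by
        simp; omega
      rw [this]
    · rw [ih]
      have : i - 1 - (ys.length : Int) = i - ((v :: ys).length : Int) := by
        simp; omega
      rw [this]

theorem aEndRev_all_ne_one (orr : Int) :
    ∀ (zs : List Int), (∀ v ∈ zs, v ≠ 1) → ∀ (i num : Int), aEndRev orr zs i num = none := by
  intro zs
  induction zs with
  | nil => intro _ i num; rfl
  | cons v zs ih =>
    intro h i num
    have hv : v ≠ 1 := h v (by simp)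
    simp only [aEndRev, if_neg hv]
    exact ih (fun w hw => h w (by simp [hw])) _ _

theorem aEndRev_ones (orr : Int) :
    ∀ (m : Nat) (i num : Int),
    aEndRev orr (List.replicate m 1) i num
      = if m = 0 then none
        else if num + 1 ≥ orr then some (i + orr - 1)
        else if num + (m : Int) ≥ orr then some (i + num)
        else none := by
  intro m
  induction m with
  | zero => intro i num; simp [aEndRev]
  | succ m ih =>
    intro i num
    simp only [List.replicate_succ, aEndRev]
    by_cases h1 : num + 1 ≥ orr
    · simp [h1]
    · rw [if_neg h1, ih]
      by_cases hm : m = 0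
      · subst hm; simp [h1]
      · rw [if_neg hm, if_neg (by omega : ¬ (m + 1 = 0)), if_neg h1]
        push_cast
        split_ifs with h2 h3 <;>
          first | (exact congrArg some (by omega)) | (exfalso; omega) | rfl

theorem dropWhile_head_false {α : Type} (p : α → Bool) :
    ∀ (l : List α) (a : α) (l' : List α), l.dropWhile p = a :: l' → p a = false := by
  intro l
  induction l with
  | nil => intro a l' h; cases h
  | cons b bs ih =>
    intro a l' h
    by_cases hb : p b = true
    · rw [List.dropWhile_cons_of_pos hb] at h
      exact ih a l' h
    · rw [List.dropWhile_cons_of_neg (by simpa using hb)] at h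
      cases h
      simpa using hb

theorem end_main (orr : Int) (horr : 1 ≤ orr) :
    ∀ (xs : List Int) (i : Nat) (d : Int),
    (aEndRev orr xs.reverse ((i : Int) + xs.length - 1) 0).getD d
      = bEndFold orr (runsFrom (fun v => decide (v = 1)) i xs) d := by
  suffices H : ∀ (n : Nat) (xs : List Int), xs.length ≤ n → ∀ (i : Nat) (d : Int),
      (aEndRev orr xs.reverse ((i : Int) + xs.length - 1) 0).getD d
        = bEndFold orr (runsFrom (fun v => decide (v = 1)) i xs) d by
    intro xs i d; exact H xs.length xs le_rfl i d
  intro n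
  induction n with
  | zero =>
    intro xs hn i d
    have : xs = [] := List.eq_nil_of_length_eq_zero (by omega)
    subst this
    simp [aEndRev, runsFrom_nil, bEndFold]
  | succ n ihn =>
    intro xs hn i d
    cases xs with
    | nil => simp [aEndRev, runsFrom_nil, bEndFold]
    | cons x rest =>
      -- peel the first maximal run x :: t; r is the remainder
      set q : Int → Bool := fun v => decide (v = 1) with hqdef
      set t := rest.takeWhile (fun y => q y = q x) with htdef
      set r := rest.dropWhile (fun y => q y = q x) with hrdef
      have hsplit : x :: rest = (x :: t) ++ r := by
        simp [htdef, hrdef, List.takeWhile_append_dropWhile]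
      have hrlen : r.length ≤ rest.length := List.length_dropWhile_le _ _
      have hlen : rest.length = t.length + r.length := by
        conv_lhs => rw [show rest = t ++ r from (List.takeWhile_append_dropWhile ..).symm]
        simp
      -- A side: split the backward scan at the run boundary
      rw [show (x :: rest).reverse = r.reverse ++ (x :: t).reverse by
            rw [hsplit, List.reverse_append]]
      rw [aEndRev_eq_fst_aEndSt, aEndSt_append]
      -- B side: one run peeled
      rw [runsFrom_cons, bEndFold, List.foldl_cons]
      -- name B's value after absorbing the first run
      set d' := (if q x = true ∧ (i : Int) + 1 + (t.length : Int) - (i : Int) ≥ orr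
                 then (i : Int) + 1 + (t.length : Int) - 1
                 else d) with hd'
      have hn' : rest.length + 1 ≤ n + 1 := by simpa using hn
      have hIH := ihn r (by omega) (i + 1 + t.length) d'
      set T : Int := (i : Int) + ((x :: rest).length : Int) - 1 with hT
      rcases hAS : aEndSt orr r.reverse T 0 with ⟨o, m⟩
      rw [← htdef, ← hrdef]
      have hTT : ((i + 1 + t.length : Nat) : Int) + (r.length : Int) - 1 = T := by
        rw [hT]; simp only [List.length_cons, hlen]; push_cast; omega
      rw [aEndRev_eq_fst_aEndSt, hTT, hAS] at hIH
      show _ = bEndFold orr (runsFrom q (i + 1 + t.length) r) d'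
      cases o with
      | some u => simpa using hIH
      | none =>
        rw [← hIH]
        simp only [List.length_reverse]
        by_cases hx1 : x = 1
        · have hq : q x = true := by simp [hqdef, hx1]
          -- the pending counter is 0 at the run boundary
          have hm : m = 0 := by
            cases hr : r with
            | nil =>
              rw [hr] at hAS
              simp only [List.reverse_nil, aEndSt] at hAS
              simpa using (congrArg Prod.snd hAS).symm
            | cons r0 rr =>
              have hr0 : q r0 ≠ q x := by
                have hd : List.dropWhile (fun y => decide (q y = q x)) rest = r0 :: rr := by
                  rw [← hrdef, hr]
                have := dropWhile_head_false _ rest r0 rr hd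
                simpa using this
              rw [hr, List.reverse_cons, aEndSt_append] at hAS
              rcases h2 : aEndSt orr rr.reverse T 0 with ⟨o2, m2⟩
              rw [h2] at hAS
              cases o2 with
              | some u2 => simp at hAS
              | none =>
                have hr0' : r0 ≠ 1 := by
                  intro hh; apply hr0; rw [hh, hx1]
                simp only [aEndSt, if_neg hr0'] at hAS
                simpa using (congrArg Prod.snd hAS).symm
          subst hm
          have hrep : (x :: t).reverse = List.replicate (t.length + 1) (1 : Int) := by
            have hmem : ∀ b ∈ (x :: t).reverse, b = (1 : Int) := by
              intro b hb
              rw [List.mem_reverse] at hb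
              rcases List.mem_cons.mp hb with hb | hb
              · exact hb.trans hx1  -- hb : b = x
              · have := List.mem_takeWhile_imp (htdef ▸ hb)
                have h1 : q b = q x := by simpa using this
                rw [hq] at h1
                simpa [hqdef] using h1
            have := List.eq_replicate_of_mem hmem
            simpa using this
          rw [hrep, ← aEndRev_eq_fst_aEndSt, aEndRev_ones]
          have hTr : T - (r.length : Int) = (i : Int) + (t.length : Int) := by
            rw [hT]; simp only [List.length_cons, hlen]; push_cast; omega
          rw [hTr, hd']
          simp only [hq, true_and, Option.getD_none]
          split_ifs <;> simp only [Option.getD_some, Option.getD_none] <;>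
            first | rfl | contradiction | omega | (exfalso; omega)
        · have hq : q x = false := by simp [hqdef, hx1]
          have hall : ∀ v ∈ (x :: t).reverse, v ≠ 1 := by
            intro v hv
            rw [List.mem_reverse] at hv
            rcases List.mem_cons.mp hv with hv | hv
            · intro hh; exact hx1 (hv ▸ hh)
            · have := List.mem_takeWhile_imp (htdef ▸ hv)
              have h1 : q v = q x := by simpa using this
              rw [hq] at h1
              simpa [hqdef] using h1
          rw [← aEndRev_eq_fst_aEndSt, aEndRev_all_ne_one orr _ hall]
          rw [hd']
          rw [if_neg (by simp [hq])]

-- ---- end side (order_resp ≤ 0, no 1 in data) ----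

theorem bEndFold_all_false (orr : Int) (p : Int → Bool) :
    ∀ (n : Nat) (xs : List Int), xs.length ≤ n → (∀ v ∈ xs, p v = false) → ∀ (i : Nat) (d : Int),
    bEndFold orr (runsFrom p i xs) d = d := by
  intro n
  induction n with
  | zero =>
    intro xs hn _ i d
    have : xs = [] := List.eq_nil_of_length_eq_zero (by omega)
    subst this; simp [runsFrom_nil, bEndFold]
  | succ n ihn =>
    intro xs hn h i d
    cases xs with
    | nil => simp [runsFrom_nil, bEndFold]
    | cons x rest =>
      have hx : p x = false := h x (by simp)
      rw [runsFrom_cons, bEndFold, List.foldl_cons]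
      rw [if_neg (by simp [hx])]
      have hsub : (rest.dropWhile (fun y => p y = p x)).length ≤ n := by
        have := List.length_dropWhile_le (fun y => p y = p x) rest
        simp only [List.length_cons] at hn
        omega
      have hmem : ∀ v ∈ rest.dropWhile (fun y => p y = p x), p v = false := by
        intro v hv
        exact h v (List.mem_cons_of_mem x ((List.dropWhile_sublist _).subset hv))
      exact ihn _ hsub hmem _ d

-- ===== VERDICT (by name: the statement is the Claim_ definition above) =====
theorem detection_start_end_spec : Claim_equal_detection_start_end := by
  intro data posture orr op _ hpre
  unfold Spec_detection_start_end detection_start_end detection_start_end_alt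
  rw [bRuns_eq_runsFrom, bRuns_eq_runsFrom]
  unfold Pre_detection_start_end at hpre
  refine Prod.ext ?_ ?_
  · rcases hpre.1 with hop | hz
    · have hs := start_main op hop posture 0 0 (Or.inl rfl)
      simpa using hs
    · simp only
      rw [aStartLoop_all_zero op posture hz 0 0]
      rw [bStartLoop_all_false op _ posture.length posture le_rfl
        (fun v hv => by simp [hz v hv]) 0]
      rfl
  · rcases hpre.2 with horr | hno1'
    · have he0 := aEndLoop_eq_aEndRev orr data data.length le_rfl 0
      have he := end_main orr horr data 0 ((data.length : Int) - 1)
      simp only [List.take_length] at he0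
      simp only [Nat.cast_zero, zero_add] at he
      simp only
      rw [he0, he]
    · have hno1 : ∀ v ∈ data, v ≠ 1 := fun v hv hveq => hno1' (hveq ▸ hv)
      have he0 := aEndLoop_eq_aEndRev orr data data.length le_rfl 0
      simp only [List.take_length] at he0
      simp only
      rw [he0, aEndRev_all_ne_one orr data.reverse
        (fun v hv => hno1 v (List.mem_reverse.mp hv)) _ 0]
      rw [bEndFold_all_false orr _ data.length data le_rfl
        (fun v hv => by simp [hno1 v hv]) 0]
      rfl
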